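-- pv_equiv track=rewrite | github.com/DeboraCristina/My-Linux | Bash-Configs/chmod_help/chmodhelp.py | __is_character_permission
-- ===== SOURCE A (Python) =====
-- def __is_character_permission(input_permission):
--     permissions = ['rwx', 'rw-', 'r-x', 'r--', '-wx', '-w-', '--x', '---']
--     if input_permission == '---------':
--         return True
--     if len(input_permission) != 9 or not input_permission.replace('-', '').isalpha():
--         return False
--     for index in range(0, 9, 3):
--         start = index
--         end = index + 3
--         permission = input_permission[start:end]
--         if permission not in permissions:
--             return False
--     return True
-- ===== SOURCE B (Python) =====
-- def __is_character_permission(input_permission):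
--     # Positional check: slot i must hold 'rwxrwxrwx'[i] or '-'.
--     if len(input_permission) != 9:
--         return False
--     return all(c == e or c == '-' for c, e in zip(input_permission, 'rwxrwxrwx'))
-- ===== Notes on version B (the rewrite author's own statement) =====
-- stated objective: simpler
-- what changed: Replaces A's per-3-char-group membership test against an 8-pattern table (plus the separate all-dashes special case and the isalpha check on the dash-stripped string) by a single positional pass comparing each character against its expected slot letter (r/w/x by position) or a dash.
import Mathlib
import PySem

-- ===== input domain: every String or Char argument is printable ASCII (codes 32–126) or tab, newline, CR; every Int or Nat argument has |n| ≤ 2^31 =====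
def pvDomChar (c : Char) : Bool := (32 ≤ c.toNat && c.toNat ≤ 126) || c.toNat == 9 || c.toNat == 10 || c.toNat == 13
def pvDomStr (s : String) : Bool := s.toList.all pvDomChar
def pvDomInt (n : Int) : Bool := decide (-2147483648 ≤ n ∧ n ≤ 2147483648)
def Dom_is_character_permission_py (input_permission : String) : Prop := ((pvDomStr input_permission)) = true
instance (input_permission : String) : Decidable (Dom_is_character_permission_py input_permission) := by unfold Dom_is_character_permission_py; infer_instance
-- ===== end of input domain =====

-- B replaces A's 3-char-group table lookup (with its '---------' special case and
-- isalpha-after-dash-removal filter) by a single positional check against "rwxrwxrwx"; objective: simpler.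


-- ===== PORT A =====
def is_character_permission_py (input_permission : String) : Bool :=
  let permissions : List String := ["rwx", "rw-", "r-x", "r--", "-wx", "-w-", "--x", "---"]
  if input_permission == "---------" then
    true
  else if PySem.Str.len input_permission ≠ 9
      || !(PySem.Str.strIsalpha (PySem.Str.replace input_permission "-" "")) then
    false
  else
    (PySem.List.pyRange 0 9 3).all (fun index =>
      let start := index
      let stop := index + 3
      let permission := PySem.Str.slice input_permission (some start) (some stop)
      permissions.contains permission)

-- ===== PORT B =====
def is_character_permission_py_alt (input_permission : String) : Bool :=
  if PySem.Str.len input_permission ≠ 9 then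
    false
  else
    (input_permission.toList.zip "rwxrwxrwx".toList).all
      (fun ce => ce.1 == ce.2 || ce.1 == '-')

-- ===== PRECONDITION & SPEC =====
def Spec_is_character_permission_py (input_permission : String) (out : Bool) : Prop := out = is_character_permission_py_alt input_permission
instance (input_permission : String) (out : Bool) : Decidable (Spec_is_character_permission_py input_permission out) := by unfold Spec_is_character_permission_py; infer_instance

-- ===== CLAIM (what is proved, stated in full; the proofs are below) =====
def Claim_equal_is_character_permission_py : Prop := ∀ (input_permission : String), Dom_is_character_permission_py input_permission → Spec_is_character_permission_py input_permission (is_character_permission_py input_permission)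

-- ===== LEMMAS AND PROOFS =====

-- replace(s, '-', '') deletes the dashes: the go loop with enough fuel is a filter
theorem replace_go_dash (l : List Char) : ∀ (fuel : Nat) (acc : List Char), l.length ≤ fuel →
    PySem.Chars.replace.go ['-'] [] fuel l acc = acc.reverse ++ l.filter (· != '-') := by
  induction l with
  | nil =>
    intro fuel acc _
    cases fuel <;> simp [PySem.Chars.replace.go]
  | cons c t ih =>
    intro fuel acc hle
    cases fuel with
    | zero => simp at hle
    | succ f =>
      by_cases hc : c = '-'
      · subst hc
        rw [PySem.Chars.replace.go]
        rw [if_pos (by simp [List.isPrefixOf])]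
        simpa using ih f acc (by simpa using hle)
      · rw [PySem.Chars.replace.go]
        rw [if_neg (by simp [List.isPrefixOf]; exact fun h => hc h.symm)]
        rw [ih f (c :: acc) (by simpa using hle)]
        simp [hc]

theorem replace_dash (l : List Char) : PySem.Chars.replace l ['-'] [] = l.filter (· != '-') := by
  rw [PySem.Chars.replace]
  rw [if_neg (by simp)]
  simpa using replace_go_dash l l.length [] le_rfl

-- equality of two three-character strings, componentwise
theorem strEq3 (x y z p q r : Char) :
    (String.ofList [x, y, z] == String.ofList [p, q, r]) = (x == p && (y == q && z == r)) := by
  rw [Bool.eq_iff_iff]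
  simp [String.ext_iff]

theorem bool_distrib : ∀ (p p' q q' r r' : Bool),
    (p && (q && r) || (p && (q && r') || (p && (q' && r) || (p && (q' && r') ||
     (p' && (q && r) || (p' && (q && r') || (p' && (q' && r) || p' && (q' && r')))))))) =
    ((p || p') && ((q || q') && (r || r'))) := by decide

-- A's 8-pattern table membership for one 3-char group is exactly the positional check
theorem group_mem (x y z : Char) :
    (["rwx", "rw-", "r-x", "r--", "-wx", "-w-", "--x", "---"] : List String).contains
      (String.ofList [x, y, z]) =
    ((x == 'r' || x == '-') && ((y == 'w' || y == '-') && (z == 'x' || z == '-'))) := by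
  have h1 : ("rwx" : String) = String.ofList ['r', 'w', 'x'] := by decide
  have h2 : ("rw-" : String) = String.ofList ['r', 'w', '-'] := by decide
  have h3 : ("r-x" : String) = String.ofList ['r', '-', 'x'] := by decide
  have h4 : ("r--" : String) = String.ofList ['r', '-', '-'] := by decide
  have h5 : ("-wx" : String) = String.ofList ['-', 'w', 'x'] := by decide
  have h6 : ("-w-" : String) = String.ofList ['-', 'w', '-'] := by decide
  have h7 : ("--x" : String) = String.ofList ['-', '-', 'x'] := by decide
  have h8 : ("---" : String) = String.ofList ['-', '-', '-'] := by decide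
  simp only [List.contains_cons, List.contains_nil, Bool.or_false,
    h1, h2, h3, h4, h5, h6, h7, h8, strEq3]
  exact bool_distrib _ _ _ _ _ _

theorem pyRange093 : PySem.List.pyRange 0 9 3 = [0, 3, 6] := by decide

theorem if_not_bool (t p : Bool) : (if (!t) = true then false else p) = (t && p) := by
  cases t <;> simp

-- a 9-char string whose every slot is its rwxrwxrwx letter or '-', and which is not all
-- dashes, stays a nonempty alphabetic string once the dashes are removed
theorem alpha_of_pos (a b c d e f g h i : Char)
    (hd : ¬(a = '-' ∧ b = '-' ∧ c = '-' ∧ d = '-' ∧ e = '-' ∧ f = '-' ∧ g = '-' ∧ h = '-' ∧ i = '-'))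
    (h1 : a = 'r' ∨ a = '-') (h2 : b = 'w' ∨ b = '-') (h3 : c = 'x' ∨ c = '-')
    (h4 : d = 'r' ∨ d = '-') (h5 : e = 'w' ∨ e = '-') (h6 : f = 'x' ∨ f = '-')
    (h7 : g = 'r' ∨ g = '-') (h8 : h = 'w' ∨ h = '-') (h9 : i = 'x' ∨ i = '-') :
    PySem.Chars.strIsalpha (List.filter (fun x => x != '-') [a, b, c, d, e, f, g, h, i]) = true := by
  rcases h1 with rfl | rfl <;> rcases h2 with rfl | rfl <;> rcases h3 with rfl | rfl <;>
    rcases h4 with rfl | rfl <;> rcases h5 with rfl | rfl <;> rcases h6 with rfl | rfl <;>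
    rcases h7 with rfl | rfl <;> rcases h8 with rfl | rfl <;> rcases h9 with rfl | rfl <;>
    first
      | decide
      | exact absurd ⟨rfl, rfl, rfl, rfl, rfl, rfl, rfl, rfl, rfl⟩ hd

-- the core case: both ports agree on any 9-character string
theorem main9 (a b c d e f g h i : Char) :
    is_character_permission_py (String.ofList [a, b, c, d, e, f, g, h, i]) =
    is_character_permission_py_alt (String.ofList [a, b, c, d, e, f, g, h, i]) := by
  by_cases hd : a = '-' ∧ b = '-' ∧ c = '-' ∧ d = '-' ∧ e = '-' ∧ f = '-' ∧ g = '-' ∧ h = '-' ∧ i = '-'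
  · obtain ⟨rfl, rfl, rfl, rfl, rfl, rfl, rfl, rfl, rfl⟩ := hd
    decide
  · have hne : (String.ofList [a, b, c, d, e, f, g, h, i] == "---------") = false := by
      rw [beq_eq_false_iff_ne]
      intro hs
      rw [String.ext_iff] at hs
      simp only [String.toList_ofList] at hs
      rw [show ("---------" : String).toList = ['-', '-', '-', '-', '-', '-', '-', '-', '-'] from by decide] at hs
      simp at hs
      exact hd hs
    have hs1 : PySem.Chars.slice [a, b, c, d, e, f, g, h, i] (some 0) (some 3) = [a, b, c] := by
      simp [PySem.Chars.slice_eq_listSlice, PySem.List.slice, PySem.List.clampIdx]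
    have hs2 : PySem.Chars.slice [a, b, c, d, e, f, g, h, i] (some 3) (some 6) = [d, e, f] := by
      simp [PySem.Chars.slice_eq_listSlice, PySem.List.slice, PySem.List.clampIdx]
    have hs3 : PySem.Chars.slice [a, b, c, d, e, f, g, h, i] (some 6) (some 9) = [g, h, i] := by
      simp [PySem.Chars.slice_eq_listSlice, PySem.List.slice, PySem.List.clampIdx]
    unfold is_character_permission_py is_character_permission_py_alt
    rw [hne]
    simp only [PySem.Str.len, String.toList_ofList, pyRange093, PySem.Str.slice, PySem.Str.replace,
      PySem.Str.strIsalpha, String.toList_ofList]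
    simp only [List.all_cons, List.all_nil, Bool.and_true]
    rw [show ((0 : Int) + 3) = 3 from rfl, show ((3 : Int) + 3) = 6 from rfl, show ((6 : Int) + 3) = 9 from rfl]
    rw [if_neg (by simp)]
    rw [hs1, hs2, hs3, group_mem, group_mem, group_mem]
    rw [show ("-" : String).toList = ['-'] from by decide, show ("" : String).toList = [] from by decide]
    rw [replace_dash]
    rw [show ("rwxrwxrwx" : String).toList = ['r', 'w', 'x', 'r', 'w', 'x', 'r', 'w', 'x'] from by decide]
    have hlen : (decide ((↑([a, b, c, d, e, f, g, h, i].length) : Int) ≠ 9)) = false := by simp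
    rw [hlen, Bool.false_or, if_not_bool]
    rw [if_neg (show ¬((↑([a, b, c, d, e, f, g, h, i].length) : Int) ≠ 9) from by simp)]
    simp only [List.zip_cons_cons, List.zip_nil_right, List.all_cons, List.all_nil, Bool.and_true]
    have hassoc : ∀ p1 p2 p3 p4 p5 p6 p7 p8 p9 : Bool,
        (p1 && (p2 && p3) && (p4 && (p5 && p6) && (p7 && (p8 && p9)))) =
        (p1 && (p2 && (p3 && (p4 && (p5 && (p6 && (p7 && (p8 && p9)))))))) := by decide
    rw [hassoc]
    cases hP : ((a == 'r' || a == '-') && ((b == 'w' || b == '-') && ((c == 'x' || c == '-') &&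
        ((d == 'r' || d == '-') && ((e == 'w' || e == '-') && ((f == 'x' || f == '-') &&
        ((g == 'r' || g == '-') && ((h == 'w' || h == '-') && (i == 'x' || i == '-'))))))))) with
    | false => simp
    | true =>
      simp only [Bool.and_true]
      simp only [Bool.and_eq_true, Bool.or_eq_true, beq_iff_eq] at hP
      obtain ⟨h1, h2, h3, h4, h5, h6, h7, h8, h9⟩ := hP
      exact alpha_of_pos a b c d e f g h i hd h1 h2 h3 h4 h5 h6 h7 h8 h9

theorem exists9 (l : List Char) (hl : l.length = 9) :
    ∃ a b c d e f g h i, l = [a, b, c, d, e, f, g, h, i] := by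
  match l, hl with
  | [a, b, c, d, e, f, g, h, i], _ => exact ⟨a, b, c, d, e, f, g, h, i, rfl⟩

-- ===== VERDICT (by name: the statement is the Claim_ definition above) =====
theorem is_character_permission_py_spec : Claim_equal_is_character_permission_py := by
  intro s _
  unfold Spec_is_character_permission_py
  by_cases h9 : s.toList.length = 9
  · obtain ⟨a, b, c, d, e, f, g, h, i, hsl⟩ := exists9 s.toList h9
    have hs : String.ofList s.toList = s := String.ofList_toList
    rw [← hs, hsl]
    exact main9 a b c d e f g h i
  · have hne : (s == "---------") = false := by
      apply beq_eq_false_iff_ne.mpr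
      intro hs
      apply h9
      rw [hs]
      decide
    have hl : ¬((s.length : Int) = 9) := by
      rw [← String.length_toList]
      exact_mod_cast h9
    simp [is_character_permission_py, is_character_permission_py_alt, hne, PySem.Str.len, hl]
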